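-- pv_equiv track=rewrite | github.com/harshilkhara/LeetCode_qts | k-diff.py | findPairs3
-- ===== SOURCE A (Python) =====
-- import collections
--
-- def findPairs3(nums,k):              # TC O(n)   // SC O(n)
--     c=collections.Counter(nums)
--     count=0
--     if k==0:
--         for key,v in c.items(): # c.items() returns dic as a tuple [("key","value")]
--             if v > 1:
--                 count+=1
--     else:
--         for key,v in c.items():
--             if key+k in c:
--                 count+=1
--     return count
-- ===== SOURCE B (Python) =====
-- def findPairs3(nums, k):
--     seen = set()
--     dups = set()
--     pairs = set()
--     for x in nums:
--         if x in seen: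
--             dups.add(x)
--         else:
--             if x - k in seen:
--                 pairs.add(x - k)
--             if x + k in seen:
--                 pairs.add(x)
--             seen.add(x)
--     return len(dups) if k == 0 else len(pairs)
-- ===== Notes on version B (the rewrite author's own statement) =====
-- stated objective: alternative
-- what changed: Replaces A's two-phase Counter-build-then-scan-items with the classic single-pass solution that maintains three sets (seen, duplicate values, left endpoints of found pairs) while streaming over nums once.
import Mathlib
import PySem

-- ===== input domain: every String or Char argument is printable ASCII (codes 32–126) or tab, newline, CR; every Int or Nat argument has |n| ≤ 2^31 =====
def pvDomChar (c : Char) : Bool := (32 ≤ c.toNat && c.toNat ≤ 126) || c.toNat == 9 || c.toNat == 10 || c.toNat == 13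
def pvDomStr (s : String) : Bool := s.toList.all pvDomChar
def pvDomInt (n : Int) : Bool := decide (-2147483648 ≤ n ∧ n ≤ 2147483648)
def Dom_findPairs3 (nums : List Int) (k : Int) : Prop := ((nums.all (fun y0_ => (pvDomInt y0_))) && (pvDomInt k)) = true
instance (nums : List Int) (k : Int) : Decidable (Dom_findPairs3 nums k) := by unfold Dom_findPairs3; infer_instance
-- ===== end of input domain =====

-- B replaces A's Counter-then-scan with a single pass maintaining seen/dups/pairs sets (objective: alternative, same O(n) cost).
-- ===== PORT A =====
def findPairs3 (nums : List Int) (k : Int) : Int :=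
  let c := PySem.Dict.counter nums
  let count : Int := 0
  if k == 0 then
    c.items.foldl (fun count kv => if kv.2 > 1 then count + 1 else count) count
  else
    c.items.foldl (fun count kv => if c.contains (kv.1 + k) then count + 1 else count) count

-- ===== PORT B =====
def pvStepB (k : Int) (st : PySem.Set Int × PySem.Set Int × PySem.Set Int) (x : Int) :
    PySem.Set Int × PySem.Set Int × PySem.Set Int :=
  let (seen, dups, pairs) := st
  if PySem.Set.contains seen x then
    (seen, PySem.Set.add dups x, pairs)
  else
    let pairs := if PySem.Set.contains seen (x - k) then PySem.Set.add pairs (x - k) else pairs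
    let pairs := if PySem.Set.contains seen (x + k) then PySem.Set.add pairs x else pairs
    (PySem.Set.add seen x, dups, pairs)

def findPairs3_alt (nums : List Int) (k : Int) : Int :=
  let st := nums.foldl (pvStepB k) (PySem.Set.empty, PySem.Set.empty, PySem.Set.empty)
  if k == 0 then PySem.Set.len st.2.1 else PySem.Set.len st.2.2

-- ===== PRECONDITION & SPEC =====
def Spec_findPairs3 (nums : List Int) (k : Int) (out : Int) : Prop := out = findPairs3_alt nums k
instance (nums : List Int) (k : Int) (out : Int) : Decidable (Spec_findPairs3 nums k out) := by unfold Spec_findPairs3; infer_instance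

-- ===== CLAIM (what is proved, stated in full; the proofs are below) =====
def Claim_equal_findPairs3 : Prop := ∀ (nums : List Int) (k : Int), Dom_findPairs3 nums k → Spec_findPairs3 nums k (findPairs3 nums k)

-- ===== LEMMAS AND PROOFS =====
theorem pvInvB (k : Int) (l : List Int) : ∀ (p : List Int) (dups pairs : PySem.Set Int),
    dups.Nodup → (∀ x, x ∈ dups ↔ 2 ≤ p.count x) →
    pairs.Nodup → (∀ x, x ∈ pairs ↔ (x ∈ p ∧ x + k ∈ p ∧ k ≠ 0)) →
    ((l.foldl (pvStepB k) (PySem.Set.ofList p, dups, pairs)).2.1.Nodup ∧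
     (∀ x, x ∈ (l.foldl (pvStepB k) (PySem.Set.ofList p, dups, pairs)).2.1 ↔ 2 ≤ (p ++ l).count x) ∧
     (l.foldl (pvStepB k) (PySem.Set.ofList p, dups, pairs)).2.2.Nodup ∧
     (∀ x, x ∈ (l.foldl (pvStepB k) (PySem.Set.ofList p, dups, pairs)).2.2 ↔ (x ∈ p ++ l ∧ x + k ∈ p ++ l ∧ k ≠ 0))) := by
  induction l with
  | nil => intro p dups pairs hdn hd hpn hp; simpa using ⟨hdn, hd, hpn, hp⟩
  | cons x l ih =>
    intro p dups pairs hdn hd hpn hp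
    have hreassoc : p ++ x :: l = (p ++ [x]) ++ l := by simp
    rw [List.foldl_cons, hreassoc]
    by_cases hx : x ∈ p
    · have hm : x ∈ PySem.Set.ofList p := (PySem.Set.mem_ofList p x).mpr hx
      have hstep : pvStepB k (PySem.Set.ofList p, dups, pairs) x
          = (PySem.Set.ofList p, PySem.Set.add dups x, pairs) := by
        simp [pvStepB, hm]
      rw [hstep]
      have hof : PySem.Set.ofList p = PySem.Set.ofList (p ++ [x]) := by
        rw [PySem.Set.ofList_append_singleton, PySem.Set.add, if_pos]
        rw [PySem.Set.contains_iff]; exact hm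
      rw [hof]
      apply ih (p ++ [x])
      · exact PySem.Set.nodup_add dups x hdn
      · intro y
        rw [PySem.Set.mem_add, hd, List.count_append]
        have hcx : 0 < p.count x := List.count_pos_iff.mpr hx
        by_cases hyx : y = x
        · subst hyx
          simp
          omega
        · simp only [List.count_singleton, beq_iff_eq]
          rw [if_neg (fun h => hyx h.symm)]
          simp [hyx]
      · exact hpn
      · intro y
        rw [hp]
        have hmem : ∀ z : Int, z ∈ p ++ [x] ↔ z ∈ p := by
          intro z; simp; rintro rfl; exact hx
        rw [hmem, hmem]
    · have hm : x ∉ PySem.Set.ofList p := fun h => hx ((PySem.Set.mem_ofList p x).mp h)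
      have hxk : (PySem.Set.contains (PySem.Set.ofList p) (x + k) = true) ↔ x + k ∈ p := by
        rw [PySem.Set.contains_iff, PySem.Set.mem_ofList]
      have hxmk : (PySem.Set.contains (PySem.Set.ofList p) (x - k) = true) ↔ x - k ∈ p := by
        rw [PySem.Set.contains_iff, PySem.Set.mem_ofList]
      have hstep : pvStepB k (PySem.Set.ofList p, dups, pairs) x
          = (PySem.Set.add (PySem.Set.ofList p) x, dups,
             (if PySem.Set.contains (PySem.Set.ofList p) (x + k) then
                PySem.Set.add (if PySem.Set.contains (PySem.Set.ofList p) (x - k) then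
                  PySem.Set.add pairs (x - k) else pairs) x
              else (if PySem.Set.contains (PySem.Set.ofList p) (x - k) then
                  PySem.Set.add pairs (x - k) else pairs))) := by
        simp [pvStepB, hm]
      rw [hstep, ← PySem.Set.ofList_append_singleton]
      have hm1 : ∀ y, y ∈ (if PySem.Set.contains (PySem.Set.ofList p) (x - k) then
          PySem.Set.add pairs (x - k) else pairs) ↔ y ∈ pairs ∨ (x - k ∈ p ∧ y = x - k) := by
        intro y
        by_cases h2 : x - k ∈ p
        · rw [if_pos (hxmk.mpr h2), PySem.Set.mem_add]
          simp [h2]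
        · rw [if_neg (fun hc => h2 (hxmk.mp hc))]
          simp [h2]
      have hpn1 : (if PySem.Set.contains (PySem.Set.ofList p) (x - k) then
          PySem.Set.add pairs (x - k) else pairs).Nodup := by
        split_ifs
        · exact PySem.Set.nodup_add _ _ hpn
        · exact hpn
      apply ih (p ++ [x])
      · exact hdn
      · intro y
        rw [hd, List.count_append]
        by_cases hyx : y = x
        · subst hyx
          have h0 : p.count y = 0 := List.count_eq_zero.mpr hx
          simp [h0]
        · simp only [List.count_singleton, beq_iff_eq]
          rw [if_neg (fun h => hyx h.symm)]
          simp
      · by_cases h1 : x + k ∈ p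
        · rw [if_pos (hxk.mpr h1)]
          exact PySem.Set.nodup_add _ _ hpn1
        · rw [if_neg (fun hc => h1 (hxk.mp hc))]
          exact hpn1
      · intro y
        have hm2 : y ∈ (if PySem.Set.contains (PySem.Set.ofList p) (x + k) then
            PySem.Set.add (if PySem.Set.contains (PySem.Set.ofList p) (x - k) then
              PySem.Set.add pairs (x - k) else pairs) x
            else (if PySem.Set.contains (PySem.Set.ofList p) (x - k) then
              PySem.Set.add pairs (x - k) else pairs)) ↔
            (y ∈ pairs ∨ (x - k ∈ p ∧ y = x - k)) ∨ (x + k ∈ p ∧ y = x) := by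
          by_cases h1 : x + k ∈ p
          · rw [if_pos (hxk.mpr h1), PySem.Set.mem_add, hm1]
            simp [h1]
          · rw [if_neg (fun hc => h1 (hxk.mp hc)), hm1]
            simp [h1]
        rw [hm2, hp y]
        simp only [List.mem_append, List.mem_singleton]
        constructor
        · rintro ((⟨hyp, hypk, hk⟩ | ⟨h2, rfl⟩) | ⟨h1, rfl⟩)
          · exact ⟨Or.inl hyp, Or.inl hypk, hk⟩
          · refine ⟨Or.inl h2, Or.inr (by ring), fun hk0 => hx ?_⟩
            simpa [hk0] using h2
          · refine ⟨Or.inr rfl, Or.inl h1, fun hk0 => hx ?_⟩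
            simpa [hk0] using h1
        · rintro ⟨hyp | rfl, hypk | hypk, hk⟩
          · exact Or.inl (Or.inl ⟨hyp, hypk, hk⟩)
          · have hyk : x - k = y := by omega
            exact Or.inl (Or.inr ⟨hyk ▸ hyp, hyk.symm⟩)
          · exact Or.inr ⟨hypk, rfl⟩
          · exact absurd (by omega) hk

theorem findPairs3_spec' (nums : List Int) (k : Int) : findPairs3 nums k = findPairs3_alt nums k := by
  unfold findPairs3 findPairs3_alt
  obtain ⟨hdn, hd, hpn, hp⟩ := pvInvB k nums [] PySem.Set.empty PySem.Set.empty
    (by simp [PySem.Set.empty]) (by simp [PySem.Set.empty])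
    (by simp [PySem.Set.empty]) (by simp [PySem.Set.empty])
  set st := nums.foldl (pvStepB k) (PySem.Set.ofList [], PySem.Set.empty, PySem.Set.empty) with hst
  have hstEq : nums.foldl (pvStepB k) (PySem.Set.empty, PySem.Set.empty, PySem.Set.empty) = st := rfl
  rw [hstEq]
  have hSnd : (PySem.Set.ofList nums).Nodup := PySem.Set.nodup_ofList nums
  by_cases hk : k = 0
  · subst hk
    simp only [beq_self_eq_true, if_pos]
    rw [PySem.Dict.items_counter]
    rw [PySem.List.foldl_ite_add_one (p := fun kv : Int × Int => kv.2 > 1)]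
    rw [List.countP_map]
    have hperm : st.2.1.Perm ((PySem.Set.ofList nums).filter
        (fun v => decide ((1:Int) < ((nums.count v : Nat) : Int)))) := by
      apply (List.perm_ext_iff_of_nodup hdn (List.Nodup.filter _ hSnd)).mpr
      intro a
      rw [List.mem_filter, PySem.Set.mem_ofList, hd a]
      simp only [List.nil_append, decide_eq_true_eq]
      constructor
      · intro h
        have : a ∈ nums := List.count_pos_iff.mp (by omega)
        refine ⟨this, by exact_mod_cast (by omega : (1:Int) < (nums.count a : Int))⟩
      · rintro ⟨_, h⟩
        omega
    rw [PySem.Set.len_eq, hperm.length_eq, ← List.countP_eq_length_filter]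
    simp only [zero_add]
    exact congrArg _ (List.countP_congr (fun v _ => Iff.rfl))
  · have hkb : (k == 0) = false := by simp [hk]
    simp only [hkb, if_false, Bool.false_eq_true]
    rw [PySem.Dict.items_counter]
    rw [PySem.List.foldl_if_add_one (p := fun kv : Int × Int =>
      (PySem.Dict.counter nums).contains (kv.1 + k))]
    rw [List.countP_map]
    have hperm : st.2.2.Perm ((PySem.Set.ofList nums).filter
        (fun v => (PySem.Dict.counter nums).contains (v + k))) := by
      apply (List.perm_ext_iff_of_nodup hpn (List.Nodup.filter _ hSnd)).mpr
      intro a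
      rw [List.mem_filter, PySem.Set.mem_ofList, hp a]
      rw [PySem.Dict.contains_counter]
      simp only [List.nil_append, List.contains_iff_mem]
      tauto
    rw [PySem.Set.len_eq, hperm.length_eq, ← List.countP_eq_length_filter]
    simp only [zero_add]
    exact congrArg _ (List.countP_congr (fun v _ => Iff.rfl))

-- ===== VERDICT (by name: the statement is the Claim_ definition above) =====
theorem findPairs3_spec : Claim_equal_findPairs3 := by
  intro nums k _
  exact findPairs3_spec' nums k
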